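-- pv_equiv track=rewrite | github.com/YaySushi/advent-of-code-2024 | day9/d9p2.py | index_free_space
-- ===== SOURCE A (Python) =====
-- def index_free_space(efs, l):
-- 	current_l = 0
-- 	for i in range(len(efs)):
-- 		if efs[i] == '.':
-- 			current_l += 1
-- 			if current_l == l:
-- 				return i - l + 1
-- 		else: current_l = 0
-- 	return -1
-- ===== SOURCE B (Python) =====
-- def _runs(efs):
--     # run-length encode efs into (element, run_length) pairs
--     res = []
--     i = 0
--     n = len(efs)
--     while i < n:
--         j = i
--         while j < n and efs[j] == efs[i]:
--             j += 1
--         res.append((efs[i], j - i))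
--         i = j
--     return res
--
--
-- def index_free_space(efs, l):
--     off = 0
--     for c, n in _runs(efs):
--         if c == '.' and 0 < l <= n:
--             return off
--         off += n
--     return -1
-- ===== Notes on version B (the rewrite author's own statement) =====
-- stated objective: alternative
-- what changed: B run-length encodes the sequence into maximal (element, length) runs and returns the offset of the first '.'-run of length >= l (with l > 0), instead of A's per-element consecutive-dot counter with an index arithmetic return.
import Mathlib
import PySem

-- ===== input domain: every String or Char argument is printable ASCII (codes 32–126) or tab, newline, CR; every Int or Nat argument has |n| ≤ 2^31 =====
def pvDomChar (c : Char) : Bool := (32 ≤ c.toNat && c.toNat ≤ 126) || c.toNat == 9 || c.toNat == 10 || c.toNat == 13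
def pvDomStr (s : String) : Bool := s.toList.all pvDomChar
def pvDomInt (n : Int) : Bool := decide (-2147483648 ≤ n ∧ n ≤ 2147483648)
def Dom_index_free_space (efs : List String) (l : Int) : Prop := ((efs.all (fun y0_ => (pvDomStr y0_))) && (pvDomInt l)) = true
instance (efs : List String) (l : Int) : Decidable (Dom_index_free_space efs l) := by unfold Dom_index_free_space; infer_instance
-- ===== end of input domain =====

-- B replaces A's per-element consecutive-dot counter by a run-length encoding pass
-- scanned with a running offset (objective: alternative decomposition, same cost).

-- ===== PORT A =====
-- A's loop over indices: state = current_l; the list is consumed left to right,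
-- i is the current index, cur the current run counter.
def pvGoA (l : Int) : List String → Int → Int → Int
  | [], _, _ => -1
  | x :: xs, i, cur =>
    if x == "." then
      if cur + 1 == l then i - l + 1 else pvGoA l xs (i + 1) (cur + 1)
    else pvGoA l xs (i + 1) 0

def index_free_space (efs : List String) (l : Int) : Int := pvGoA l efs 0 0

-- ===== PORT B =====
-- Source B's _runs: run-length encode into (element, run length) pairs
def pvRunsB : List String → List (String × Nat)
  | [] => []
  | x :: xs =>
    (x, (xs.takeWhile (· == x)).length + 1) :: pvRunsB (xs.dropWhile (· == x))
termination_by l => l.length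
decreasing_by
  simp only [List.length_cons]
  exact Nat.lt_succ_of_le (List.length_dropWhile_le _ _)

-- Source B's loop over the runs with running offset
def pvGoB (l : Int) : List (String × Nat) → Int → Int
  | [], _ => -1
  | (c, n) :: rest, off =>
    if c == "." && decide (0 < l) && decide (l ≤ (n : Int)) then off
    else pvGoB l rest (off + n)

def index_free_space_alt (efs : List String) (l : Int) : Int := pvGoB l (pvRunsB efs) 0

-- ===== PRECONDITION & SPEC =====
def Spec_index_free_space (efs : List String) (l : Int) (out : Int) : Prop := out = index_free_space_alt efs l
instance (efs : List String) (l : Int) (out : Int) : Decidable (Spec_index_free_space efs l out) := by unfold Spec_index_free_space; infer_instance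

-- ===== CLAIM (what is proved, stated in full; the proofs are below) =====
def Claim_equal_index_free_space : Prop := ∀ (efs : List String) (l : Int), Dom_index_free_space efs l → Spec_index_free_space efs l (index_free_space efs l)

-- ===== LEMMAS AND PROOFS =====

-- A on a maximal run of dots: returns iff the counter reaches l inside the run
lemma pvGoA_dotrun (l : Int) : ∀ (k : Nat) (rest : List String) (i cur : Int),
    pvGoA l (List.replicate k "." ++ rest) i cur =
      if cur < l ∧ l ≤ cur + (k : Int) then i - cur
      else pvGoA l rest (i + k) (cur + k) := by
  intro k
  induction k with
  | zero =>
    intro rest i cur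
    simp only [List.replicate, List.nil_append]
    rw [if_neg (by omega)]
    norm_num
  | succ k ih =>
    intro rest i cur
    simp only [List.replicate_succ, List.cons_append, pvGoA, BEq.rfl, if_true]
    by_cases h : cur + 1 = l
    · rw [if_pos (by exact beq_iff_eq.mpr h), if_pos (by push_cast; omega)]
      omega
    · rw [if_neg (by simp [h]), ih]
      by_cases h2 : cur + 1 < l ∧ l ≤ cur + 1 + (k : Int)
      · rw [if_pos h2, if_pos (by push_cast at h2 ⊢; omega)]
        omega
      · rw [if_neg h2, if_neg (by push_cast at h2 ⊢; omega)]
        congr 1 <;> push_cast <;> omega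

-- A on a (nonempty) run of non-dots: skips it and resets the counter
lemma pvGoA_run_ne (l : Int) (c : String) (hc : ¬ c = ".") :
    ∀ (k : Nat) (rest : List String) (i cur : Int),
      pvGoA l (List.replicate (k + 1) c ++ rest) i cur = pvGoA l rest (i + ((k : Int) + 1)) 0 := by
  intro k
  induction k with
  | zero =>
    intro rest i cur
    simp only [List.replicate, List.nil_append, List.cons_append, pvGoA]
    rw [if_neg (by simp [hc])]
    norm_num
  | succ k ih =>
    intro rest i cur
    rw [List.replicate_succ, List.cons_append]
    simp only [pvGoA]
    rw [if_neg (by simp [hc]), ih]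
    congr 1
    push_cast; omega

-- if the list does not start with ".", the incoming counter is irrelevant
lemma pvGoA_reset (l : Int) (xs : List String) (hx : xs.head? ≠ some ".") (i cur : Int) :
    pvGoA l xs i cur = pvGoA l xs i 0 := by
  cases xs with
  | nil => rfl
  | cons c t =>
    have hc : ¬ c = "." := by simpa using hx
    simp only [pvGoA]
    rw [if_neg (by simp [hc]), if_neg (by simp [hc])]

lemma head?_dropWhile_ne {α : Type} (p : α → Bool) :
    ∀ (xs : List α) (a : α), (xs.dropWhile p).head? = some a → p a = false := by
  intro xs
  induction xs with
  | nil => intro a h; simp [List.dropWhile] at h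
  | cons x t ih =>
    intro a h
    by_cases hp : p x
    · exact ih a (by simpa [List.dropWhile, hp] using h)
    · simp only [List.dropWhile, hp] at h
      simp only [List.head?] at h
      cases h
      simpa using hp

lemma takeWhile_eq_replicate {α : Type} [DecidableEq α] (x : α) (xs : List α) :
    xs.takeWhile (· == x) = List.replicate (xs.takeWhile (· == x)).length x := by
  apply List.eq_replicate_of_mem
  intro b hb
  have := List.mem_takeWhile_imp hb
  simpa using this

lemma pvGoB_runs_eq_goA (l : Int) : ∀ (n : Nat) (xs : List String), xs.length ≤ n →
    ∀ (i : Int), pvGoB l (pvRunsB xs) i = pvGoA l xs i 0 := by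
  intro n
  induction n with
  | zero =>
    intro xs hlen i
    have : xs = [] := List.eq_nil_of_length_eq_zero (Nat.le_zero.mp hlen)
    subst this
    rw [pvRunsB]
    rfl
  | succ n ih =>
    intro xs hlen i
    cases xs with
    | nil => rw [pvRunsB]; rfl
    | cons x t =>
      set k := (t.takeWhile (· == x)).length with hk
      set r := t.dropWhile (· == x) with hr
      have hdecomp : x :: t = List.replicate (k + 1) x ++ r := by
        rw [List.replicate_succ, List.cons_append]
        congr 1
        conv_lhs => rw [← List.takeWhile_append_dropWhile (p := (· == x)) (l := t)]
        rw [← hr]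
        congr 1
        rw [hk]
        exact takeWhile_eq_replicate x t
      have hrlen : r.length ≤ n := by
        have h1 := List.length_dropWhile_le (· == x) t
        rw [← hr] at h1
        simp only [List.length_cons] at hlen
        omega
      have hrhead : ∀ a, r.head? = some a → a ≠ x := by
        intro a ha
        have := head?_dropWhile_ne (· == x) t a (hr ▸ ha)
        simpa using this
      rw [pvRunsB]
      simp only [pvGoB, ← hk, ← hr]
      by_cases hx : x = "."
      · subst hx
        rw [hdecomp, pvGoA_dotrun]
        by_cases hcond : (0 : Int) < l ∧ l ≤ 0 + ((k + 1 : Nat) : Int)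
        · rw [if_pos hcond,
            if_pos (by simp only [BEq.rfl, Bool.true_and, Bool.and_eq_true, decide_eq_true_eq]
                       push_cast at hcond ⊢; omega)]
          omega
        · rw [if_neg hcond,
            if_neg (by simp only [BEq.rfl, Bool.true_and, Bool.and_eq_true, decide_eq_true_eq]
                       push_cast at hcond ⊢; omega)]
          have hrh : r.head? ≠ some "." := by
            intro h
            exact hrhead _ h rfl
          rw [pvGoA_reset l r hrh, ih r hrlen]
      · rw [if_neg (by simp [hx]), hdecomp, pvGoA_run_ne l x hx, ih r hrlen]
        congr 1

-- ===== VERDICT (by name: the statement is the Claim_ definition above) =====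
theorem index_free_space_spec : Claim_equal_index_free_space := by
  intro efs l _
  unfold Spec_index_free_space index_free_space index_free_space_alt
  exact (pvGoB_runs_eq_goA l efs.length efs (le_refl _) 0).symm
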